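-- pv_equiv track=rewrite | github.com/SiegfredLorelle/pld-assignment7 | Assignment7_Program2_ver2.py | CriteriaD
-- ===== SOURCE A (Python) =====
-- def CriteriaD(InputPassL, SpecialCharList):
--     #Criteria D - At least 1 special char
--         SpecialCharCounter = 0
--         for character in InputPassL:
--             if character in SpecialCharList:
--                 SpecialCharCounter = SpecialCharCounter + 1
--         if SpecialCharCounter > 0:
--             ConditionD = "Valid"
--             return ConditionD
-- ===== SOURCE B (Python) =====
-- def CriteriaD(InputPassL, SpecialCharList):
--     # Criteria D via set algebra: any overlap between the password's chars and the special chars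
--     if set(InputPassL) & set(SpecialCharList):
--         return "Valid"
-- ===== Notes on version B (the rewrite author's own statement) =====
-- stated objective: faster
-- what changed: Replaced the per-character loop with counter and in-loop list-membership branch by a single deduplicated set intersection whose truthiness decides the result.
import Mathlib
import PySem

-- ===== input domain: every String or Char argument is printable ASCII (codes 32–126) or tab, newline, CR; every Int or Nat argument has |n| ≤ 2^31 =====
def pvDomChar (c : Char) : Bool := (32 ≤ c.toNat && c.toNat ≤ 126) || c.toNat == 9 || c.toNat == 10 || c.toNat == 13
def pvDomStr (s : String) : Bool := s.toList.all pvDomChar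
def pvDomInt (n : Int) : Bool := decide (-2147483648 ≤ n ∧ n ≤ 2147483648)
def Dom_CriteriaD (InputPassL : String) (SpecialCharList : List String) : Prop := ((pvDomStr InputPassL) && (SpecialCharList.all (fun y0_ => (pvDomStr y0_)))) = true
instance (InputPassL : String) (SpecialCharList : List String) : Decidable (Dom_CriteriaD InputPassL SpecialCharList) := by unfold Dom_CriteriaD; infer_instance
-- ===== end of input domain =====

-- B replaces A's per-character counting loop with one deduplicated set intersection (idiomatic).
-- ===== PORT A =====
def CriteriaD (InputPassL : String) (SpecialCharList : List String) : Option String :=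
  let cnt : Int := InputPassL.toList.foldl
    (fun c character => if SpecialCharList.contains (String.mk [character]) then c + 1 else c) 0
  if cnt > 0 then some "Valid" else none

-- ===== PORT B =====
def CriteriaD_alt (InputPassL : String) (SpecialCharList : List String) : Option String :=
  if PySem.Set.inter (PySem.Set.ofList (InputPassL.toList.map (fun c => String.mk [c])))
      (PySem.Set.ofList SpecialCharList) ≠ [] then some "Valid" else none

-- ===== PRECONDITION & SPEC =====
def Spec_CriteriaD (InputPassL : String) (SpecialCharList : List String) (out : Option String) : Prop := out = CriteriaD_alt InputPassL SpecialCharList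
instance (InputPassL : String) (SpecialCharList : List String) (out : Option String) : Decidable (Spec_CriteriaD InputPassL SpecialCharList out) := by unfold Spec_CriteriaD; infer_instance

-- ===== CLAIM (what is proved, stated in full; the proofs are below) =====
def Claim_equal_CriteriaD : Prop := ∀ (InputPassL : String) (SpecialCharList : List String), Dom_CriteriaD InputPassL SpecialCharList → Spec_CriteriaD InputPassL SpecialCharList (CriteriaD InputPassL SpecialCharList)

-- ===== LEMMAS AND PROOFS =====

-- ===== VERDICT (by name: the statement is the Claim_ definition above) =====
theorem count_foldl (l : List Char) (p : List String) (c : Int) :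
    l.foldl (fun c ch => if p.contains (String.mk [ch]) then c + 1 else c) c
      = c + l.countP (fun ch => p.contains (String.mk [ch])) := by
  induction l generalizing c with
  | nil => simp
  | cons h t ih =>
    simp only [List.foldl_cons, List.countP_cons, ih]
    split_ifs <;> simp_all <;> omega

theorem CriteriaD_spec : Claim_equal_CriteriaD := by
  intro s l _
  unfold Spec_CriteriaD CriteriaD CriteriaD_alt
  simp only [count_foldl, zero_add]
  rcases eq_or_ne (PySem.Set.inter (PySem.Set.ofList (s.toList.map (fun c => String.mk [c])))
      (PySem.Set.ofList l)) [] with h | h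
  · have hno : ∀ ch ∈ s.toList, ¬ l.contains (String.mk [ch]) := by
      intro ch hch hc
      have : String.mk [ch] ∈ PySem.Set.inter
          (PySem.Set.ofList (s.toList.map (fun c => String.mk [c]))) (PySem.Set.ofList l) := by
        rw [PySem.Set.mem_inter, PySem.Set.mem_ofList, PySem.Set.mem_ofList]
        exact ⟨List.mem_map_of_mem hch, by simpa using hc⟩
      simp [h] at this
    have : s.toList.countP (fun ch => l.contains (String.mk [ch])) = 0 := by
      rw [List.countP_eq_zero]
      intro ch hch; simpa using hno ch hch
    rw [this, if_neg (not_not_intro h)]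
    norm_num
  · rcases List.exists_mem_of_ne_nil _ h with ⟨x, hx⟩
    rw [PySem.Set.mem_inter, PySem.Set.mem_ofList, PySem.Set.mem_ofList] at hx
    rcases hx with ⟨hx1, hx2⟩
    rcases List.mem_map.mp hx1 with ⟨ch, hch, rfl⟩
    have hpos : 0 < s.toList.countP (fun ch => l.contains (String.mk [ch])) := by
      rw [List.countP_pos_iff]
      exact ⟨ch, hch, by simpa using hx2⟩
    rw [if_pos h, if_pos (by omega : (0:Int) < s.toList.countP (fun ch => l.contains (String.mk [ch])))]
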